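-- pv_equiv track=rewrite | github.com/akhilvaswani/ai-resume-screener | screener.py | _is_fuzzy_match
-- ===== SOURCE A (Python) =====
-- def _is_fuzzy_match(skill1, skill2):
--     """Check if two skills are fuzzy matches (abbreviations, etc.)."""
--     abbreviations = {
--         "javascript": ["js", "es6", "es2015"],
--         "typescript": ["ts"],
--         "python": ["py"],
--         "kubernetes": ["k8s"],
--         "amazon web services": ["aws"],
--         "google cloud platform": ["gcp"],
--         "microsoft azure": ["azure"],
--         "postgresql": ["postgres"],
--         "mongodb": ["mongo"],
--         "machine learning": ["ml"],
--         "artificial intelligence": ["ai"],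
--         "continuous integration": ["ci"],
--         "continuous deployment": ["cd"],
--         "ci/cd": ["cicd", "ci cd"],
--     }
--
--     for full_name, abbrevs in abbreviations.items():
--         names = [full_name] + abbrevs
--         if skill1 in names and skill2 in names:
--             return True
--
--     # Check if one contains the other
--     if len(skill1) > 3 and len(skill2) > 3:
--         if skill1 in skill2 or skill2 in skill1:
--             return True
--
--     return False
-- ===== SOURCE B (Python) =====
-- _GROUPS = {
--     "javascript": ["js", "es6", "es2015"],
--     "typescript": ["ts"],
--     "python": ["py"],
--     "kubernetes": ["k8s"],
--     "amazon web services": ["aws"],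
--     "google cloud platform": ["gcp"],
--     "microsoft azure": ["azure"],
--     "postgresql": ["postgres"],
--     "mongodb": ["mongo"],
--     "machine learning": ["ml"],
--     "artificial intelligence": ["ai"],
--     "continuous integration": ["ci"],
--     "continuous deployment": ["cd"],
--     "ci/cd": ["cicd", "ci cd"],
-- }
--
-- # inverted index: every canonical name and abbreviation -> its group id
-- _LOOKUP = {}
-- for _gid, (_full, _abbrevs) in enumerate(_GROUPS.items()):
--     for _name in [_full] + _abbrevs:
--         _LOOKUP[_name] = _gid
--
--
-- def _is_fuzzy_match(skill1, skill2):
--     """Check if two skills are fuzzy matches (abbreviations, etc.)."""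
--     g = _LOOKUP.get(skill1)
--     if g is not None and _LOOKUP.get(skill2) == g:
--         return True
--
--     # Check if one contains the other
--     if len(skill1) > 3 and len(skill2) > 3:
--         if skill1 in skill2 or skill2 in skill1:
--             return True
--
--     return False
-- ===== Notes on version B (the rewrite author's own statement) =====
-- stated objective: idiomatic
-- what changed: The per-call loop over the 14 abbreviation groups is replaced by an inverted index (name -> group id) built once at module load; matching is two dictionary lookups and an id comparison, the group scan disappears.
import Mathlib
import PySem

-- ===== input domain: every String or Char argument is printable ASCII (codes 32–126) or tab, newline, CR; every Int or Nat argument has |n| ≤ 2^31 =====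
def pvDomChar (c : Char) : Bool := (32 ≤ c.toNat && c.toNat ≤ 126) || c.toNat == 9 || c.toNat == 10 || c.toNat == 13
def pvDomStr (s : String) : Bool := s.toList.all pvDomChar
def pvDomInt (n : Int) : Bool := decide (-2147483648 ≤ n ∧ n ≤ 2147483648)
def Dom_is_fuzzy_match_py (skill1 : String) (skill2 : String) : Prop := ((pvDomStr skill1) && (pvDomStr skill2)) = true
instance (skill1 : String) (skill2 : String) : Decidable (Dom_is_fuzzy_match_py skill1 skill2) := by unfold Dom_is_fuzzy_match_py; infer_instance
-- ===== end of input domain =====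

-- B replaces A's per-call scan over the 14 abbreviation groups with an inverted index (name -> group id) built once and two direct lookups; same return value, more idiomatic.
-- ===== PORT A =====
def pvGroups : List (String × List String) := [("javascript", ["js", "es6", "es2015"]), ("typescript", ["ts"]), ("python", ["py"]), ("kubernetes", ["k8s"]), ("amazon web services", ["aws"]), ("google cloud platform", ["gcp"]), ("microsoft azure", ["azure"]), ("postgresql", ["postgres"]), ("mongodb", ["mongo"]), ("machine learning", ["ml"]), ("artificial intelligence", ["ai"]), ("continuous integration", ["ci"]), ("continuous deployment", ["cd"]), ("ci/cd", ["cicd", "ci cd"])]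

def pvALoop : List (String × List String) → String → String → Bool
  | [], _, _ => false
  | (full_name, abbrevs) :: rest, skill1, skill2 =>
    let names := full_name :: abbrevs
    if names.contains skill1 && names.contains skill2 then true
    else pvALoop rest skill1 skill2

def is_fuzzy_match_py (skill1 : String) (skill2 : String) : Bool :=
  if pvALoop pvGroups skill1 skill2 then true
  else if PySem.Str.len skill1 > 3 && PySem.Str.len skill2 > 3 then
    if PySem.Str.isIn skill1 skill2 || PySem.Str.isIn skill2 skill1 then true else false
  else false

-- ===== PORT B =====
-- B replaces the per-call loop over the 14 groups by an inverted index built once: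
-- every canonical name and abbreviation maps to its group id; matching is two lookups.
-- (B builds its index from the same literal group table)

-- the index build of Source B: enumerate over the groups, insert every name with its group id
def pvLookup : PySem.Dict String Int :=
  (pvGroups.foldl
    (fun (acc : PySem.Dict String Int × Int) g =>
      ((g.1 :: g.2).foldl (fun d n => d.insert n acc.2) acc.1, acc.2 + 1))
    (PySem.Dict.empty, 0)).1

def is_fuzzy_match_py_alt (skill1 : String) (skill2 : String) : Bool :=
  let rest : Bool :=
    if PySem.Str.len skill1 > 3 && PySem.Str.len skill2 > 3 then
      if PySem.Str.isIn skill1 skill2 || PySem.Str.isIn skill2 skill1 then true else false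
    else false
  match PySem.Dict.get? pvLookup skill1 with
  | some g => if PySem.Dict.get? pvLookup skill2 == some g then true else rest
  | none => rest

-- ===== PRECONDITION & SPEC =====
def Spec_is_fuzzy_match_py (skill1 : String) (skill2 : String) (out : Bool) : Prop := out = is_fuzzy_match_py_alt skill1 skill2
instance (skill1 : String) (skill2 : String) (out : Bool) : Decidable (Spec_is_fuzzy_match_py skill1 skill2 out) := by unfold Spec_is_fuzzy_match_py; infer_instance

-- ===== CLAIM (what is proved, stated in full; the proofs are below) =====
def Claim_equal_is_fuzzy_match_py : Prop := ∀ (skill1 : String) (skill2 : String), Dom_is_fuzzy_match_py skill1 skill2 → Spec_is_fuzzy_match_py skill1 skill2 (is_fuzzy_match_py skill1 skill2)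

-- ===== LEMMAS AND PROOFS =====
set_option maxRecDepth 65536
set_option maxHeartbeats 4000000
-- all strings that occur in any group (canonical names and abbreviations)
def pvAllTokens : List String := ["javascript", "js", "es6", "es2015", "typescript", "ts", "python", "py", "kubernetes", "k8s", "amazon web services", "aws", "google cloud platform", "gcp", "microsoft azure", "azure", "postgresql", "postgres", "mongodb", "mongo", "machine learning", "ml", "artificial intelligence", "ai", "continuous integration", "ci", "continuous deployment", "cd", "ci/cd", "cicd", "ci cd"]

lemma pvLookup_eval : pvLookup = PySem.Dict.mk [("javascript", 0), ("js", 0), ("es6", 0), ("es2015", 0), ("typescript", 1), ("ts", 1), ("python", 2), ("py", 2), ("kubernetes", 3), ("k8s", 3), ("amazon web services", 4), ("aws", 4), ("google cloud platform", 5), ("gcp", 5), ("microsoft azure", 6), ("azure", 6), ("postgresql", 7), ("postgres", 7), ("mongodb", 8), ("mongo", 8), ("machine learning", 9), ("ml", 9), ("artificial intelligence", 10), ("ai", 10), ("continuous integration", 11), ("ci", 11), ("continuous deployment", 12), ("cd", 12), ("ci/cd", 13), ("cicd", 13), ("ci cd", 13)] := by decide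

lemma pvGet_none (s : String) (h : s ∉ pvAllTokens) :
    PySem.Dict.get? pvLookup s = none := by
  simp only [pvAllTokens, List.mem_cons, List.not_mem_nil, or_false, not_or] at h
  obtain ⟨g1, g2, g3, g4, g5, g6, g7, g8, g9, g10, g11, g12, g13, g14, g15, g16, g17, g18, g19, g20, g21, g22, g23, g24, g25, g26, g27, g28, g29, g30, g31⟩ := h
  rw [pvLookup_eval]
  simp [PySem.Dict.get?, Ne.symm g1, Ne.symm g2, Ne.symm g3, Ne.symm g4, Ne.symm g5, Ne.symm g6, Ne.symm g7, Ne.symm g8, Ne.symm g9, Ne.symm g10, Ne.symm g11, Ne.symm g12, Ne.symm g13, Ne.symm g14, Ne.symm g15, Ne.symm g16, Ne.symm g17, Ne.symm g18, Ne.symm g19, Ne.symm g20, Ne.symm g21, Ne.symm g22, Ne.symm g23, Ne.symm g24, Ne.symm g25, Ne.symm g26, Ne.symm g27, Ne.symm g28, Ne.symm g29, Ne.symm g30, Ne.symm g31]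

lemma pvALoop_none_left (s1 s2 : String) (h : s1 ∉ pvAllTokens) :
    pvALoop pvGroups s1 s2 = false := by
  simp only [pvAllTokens, List.mem_cons, List.not_mem_nil, or_false, not_or] at h
  simp [pvALoop, pvGroups, h]

-- the group-scan of A and the double lookup of B agree on every pair of strings
lemma pvPhase_eq (s1 s2 : String) :
    pvALoop pvGroups s1 s2 =
      (match PySem.Dict.get? pvLookup s1 with
       | some g => PySem.Dict.get? pvLookup s2 == some g
       | none => false) := by
  by_cases h1 : s1 ∈ pvAllTokens
  · by_cases h2 : s2 ∈ pvAllTokens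
    · simp only [pvAllTokens, List.mem_cons, List.not_mem_nil, or_false] at h1 h2
      rcases h1 with rfl|rfl|rfl|rfl|rfl|rfl|rfl|rfl|rfl|rfl|rfl|rfl|rfl|rfl|rfl|rfl|rfl|rfl|rfl|rfl|rfl|rfl|rfl|rfl|rfl|rfl|rfl|rfl|rfl|rfl|rfl <;> rcases h2 with rfl|rfl|rfl|rfl|rfl|rfl|rfl|rfl|rfl|rfl|rfl|rfl|rfl|rfl|rfl|rfl|rfl|rfl|rfl|rfl|rfl|rfl|rfl|rfl|rfl|rfl|rfl|rfl|rfl|rfl|rfl <;> decide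
    · rw [pvGet_none s2 h2]
      simp only [pvAllTokens, List.mem_cons, List.not_mem_nil, or_false] at h1
      rcases h1 with rfl|rfl|rfl|rfl|rfl|rfl|rfl|rfl|rfl|rfl|rfl|rfl|rfl|rfl|rfl|rfl|rfl|rfl|rfl|rfl|rfl|rfl|rfl|rfl|rfl|rfl|rfl|rfl|rfl|rfl|rfl <;>
        · simp only [pvAllTokens, List.mem_cons, List.not_mem_nil, or_false, not_or] at h2
          simp [pvALoop, pvGroups, h2]
          decide
  · rw [pvALoop_none_left s1 s2 h1, pvGet_none s1 h1]

-- ===== VERDICT (by name: the statement is the Claim_ definition above) =====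
theorem is_fuzzy_match_py_spec : Claim_equal_is_fuzzy_match_py := by
  intro s1 s2 _
  unfold Spec_is_fuzzy_match_py is_fuzzy_match_py is_fuzzy_match_py_alt
  rw [pvPhase_eq s1 s2]
  cases hg : PySem.Dict.get? pvLookup s1 with
  | none => simp
  | some g => by_cases hq : PySem.Dict.get? pvLookup s2 == some g <;> simp [hq]
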